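-- pv_equiv track=rewrite | github.com/midnightnnn/llm_invest | arena/data/bigquery/market_store.py | _normalize_forecast_mode
-- ===== SOURCE A (Python) =====
-- _FORECAST_MODE_ALIASES: dict[str, tuple[str, ...]] = {
--     "all": ("all", "both", "full", "raw", "base+stacked", "stacked+base", "balanced"),
--     "stacked": ("stacked", "stack", "meta", "lgbm_stack", "ridge_stack", "ensemble_stack"),
--     "lgbm": ("lgbm", "lightgbm", "stacked_lgbm", "lgbm_stack", "meta_lgbm", "stacked_lightgbm"),
--     "ridge": ("ridge", "stacked_ridge", "ridge_stack", "meta_ridge"),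
--     "avg": ("avg", "average", "simple_average", "equal_weight", "ensemble_avg"),
--     "base": ("base", "base_model", "base_models"),
-- }
--
-- def _normalize_forecast_mode(mode: str | None) -> str:
--     token = str(mode or "").strip().lower()
--     if not token:
--         return "stacked"
--     if token == "auto":
--         return "stacked"
--     for key, aliases in _FORECAST_MODE_ALIASES.items():
--         if token == key or token in aliases:
--             return key
--     return token
-- ===== SOURCE B (Python) =====
-- _FORECAST_MODE_ALIASES: dict[str, tuple[str, ...]] = {
--     "all": ("all", "both", "full", "raw", "base+stacked", "stacked+base", "balanced"),
--     "stacked": ("stacked", "stack", "meta", "lgbm_stack", "ridge_stack", "ensemble_stack"),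
--     "lgbm": ("lgbm", "lightgbm", "stacked_lgbm", "lgbm_stack", "meta_lgbm", "stacked_lightgbm"),
--     "ridge": ("ridge", "stacked_ridge", "ridge_stack", "meta_ridge"),
--     "avg": ("avg", "average", "simple_average", "equal_weight", "ensemble_avg"),
--     "base": ("base", "base_model", "base_models"),
-- }
--
-- # Precomputed reverse alias map, first-match-wins (setdefault keeps the earlier
-- # canonical key for aliases shared across groups, e.g. "lgbm_stack" -> "stacked").
-- _REVERSE: dict[str, str] = {}
-- for _key, _aliases in _FORECAST_MODE_ALIASES.items():
--     for _alias in (_key, *_aliases):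
--         _REVERSE.setdefault(_alias, _key)
--
--
-- def _normalize_forecast_mode(mode: str | None) -> str:
--     token = str(mode or "").strip().lower()
--     if not token or token == "auto":
--         return "stacked"
--     return _REVERSE.get(token, token)
-- ===== Notes on version B (the rewrite author's own statement) =====
-- stated objective: idiomatic
-- what changed: Replaces the per-call scan over the alias table by a module-level reverse dictionary built once with setdefault (first-match-wins), so normalization is a single dict lookup.
import Mathlib
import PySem

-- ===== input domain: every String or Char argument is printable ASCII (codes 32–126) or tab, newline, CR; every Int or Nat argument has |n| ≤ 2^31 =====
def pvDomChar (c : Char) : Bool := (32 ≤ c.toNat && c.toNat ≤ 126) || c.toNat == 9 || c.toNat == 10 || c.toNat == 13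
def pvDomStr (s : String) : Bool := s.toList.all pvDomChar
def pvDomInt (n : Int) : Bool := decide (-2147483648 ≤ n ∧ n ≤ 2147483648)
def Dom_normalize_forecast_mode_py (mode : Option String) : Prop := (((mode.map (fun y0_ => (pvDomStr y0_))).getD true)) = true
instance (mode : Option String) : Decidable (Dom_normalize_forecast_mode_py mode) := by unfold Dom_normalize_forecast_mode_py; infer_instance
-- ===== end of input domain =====

-- B replaces A's per-call scan of the alias table by a reverse map built once
-- with first-match-wins setdefault, so normalization is a single lookup (idiomatic).


-- ===== PORT A =====
-- module constant _FORECAST_MODE_ALIASES (shared context of both Pythons)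
def forecastModeAliases : List (String × List String) :=
  [ ("all", ["all", "both", "full", "raw", "base+stacked", "stacked+base", "balanced"]),
    ("stacked", ["stacked", "stack", "meta", "lgbm_stack", "ridge_stack", "ensemble_stack"]),
    ("lgbm", ["lgbm", "lightgbm", "stacked_lgbm", "lgbm_stack", "meta_lgbm", "stacked_lightgbm"]),
    ("ridge", ["ridge", "stacked_ridge", "ridge_stack", "meta_ridge"]),
    ("avg", ["avg", "average", "simple_average", "equal_weight", "ensemble_avg"]),
    ("base", ["base", "base_model", "base_models"]) ]

-- A's 'for key, aliases in _FORECAST_MODE_ALIASES.items(): if token == key or token in aliases: return key'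
def scanAliases (token : String) : List (String × List String) → String
  | [] => token
  | (key, aliases) :: rest =>
      if token = key ∨ token ∈ aliases then key else scanAliases token rest

def normalize_forecast_mode_py (mode : Option String) : String :=
  let token := PySem.Str.lower (PySem.Str.strip (mode.getD ""))
  if token = "" then "stacked"
  else if token = "auto" then "stacked"
  else scanAliases token forecastModeAliases

-- ===== PORT B =====
-- module-level reverse map: for key, aliases: for alias in (key, *aliases): _REVERSE.setdefault(alias, key)
def reverseAliasMap : PySem.Dict String String :=
  forecastModeAliases.foldl
    (fun d p => (p.1 :: p.2).foldl (fun d a => d.setdefault a p.1) d)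
    PySem.Dict.empty

def normalize_forecast_mode_py_alt (mode : Option String) : String :=
  let token := PySem.Str.lower (PySem.Str.strip (mode.getD ""))
  if token = "" ∨ token = "auto" then "stacked"
  else reverseAliasMap.getD token token

-- ===== PRECONDITION & SPEC =====
def Spec_normalize_forecast_mode_py (mode : Option String) (out : String) : Prop := out = normalize_forecast_mode_py_alt mode
instance (mode : Option String) (out : String) : Decidable (Spec_normalize_forecast_mode_py mode out) := by unfold Spec_normalize_forecast_mode_py; infer_instance

-- ===== CLAIM (what is proved, stated in full; the proofs are below) =====
def Claim_equal_normalize_forecast_mode_py : Prop := ∀ (mode : Option String), Dom_normalize_forecast_mode_py mode → Spec_normalize_forecast_mode_py mode (normalize_forecast_mode_py mode)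

-- ===== LEMMAS AND PROOFS =====

-- first matching key of the table, as an Option
def scanAliases? (token : String) : List (String × List String) → Option String
  | [] => none
  | (key, aliases) :: rest =>
      if token = key ∨ token ∈ aliases then some key else scanAliases? token rest

theorem scanAliases_eq_getD (token : String) (tbl : List (String × List String)) :
    scanAliases token tbl = (scanAliases? token tbl).getD token := by
  induction tbl with
  | nil => rfl
  | cons p rest ih =>
      obtain ⟨k, as⟩ := p
      by_cases h : token = k ∨ token ∈ as <;> simp [scanAliases, scanAliases?, h, ih]

theorem get?_setdefault (d : PySem.Dict String String) (a k t : String) :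
    (d.setdefault a k).get? t = (d.get? t).or (if t = a then some k else none) := by
  by_cases hc : d.contains a = true
  · rw [PySem.Dict.setdefault_of_contains _ _ hc]
    by_cases ht : t = a
    · subst ht
      rw [PySem.Dict.contains_eq_isSome_get?] at hc
      obtain ⟨v, hv⟩ := Option.isSome_iff_exists.mp hc
      simp [hv]
    · simp [ht]
  · rw [PySem.Dict.setdefault_of_not_contains _ _ (by simpa using hc)]
    rw [PySem.Dict.get?_insert]
    by_cases ht : t = a
    · subst ht
      rw [PySem.Dict.contains_eq_isSome_get?] at hc
      have hn : d.get? t = none := by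
        cases h : d.get? t <;> simp [h] at hc ⊢
      simp [hn]
    · simp [ht]

theorem get?_foldl_setdefault (l : List String) (k : String) (d : PySem.Dict String String) (t : String) :
    (l.foldl (fun d a => d.setdefault a k) d).get? t
      = (d.get? t).or (if t ∈ l then some k else none) := by
  induction l generalizing d with
  | nil => simp
  | cons a rest ih =>
      rw [List.foldl_cons, ih, get?_setdefault]
      by_cases ht : t = a <;> by_cases hr : t ∈ rest <;>
        cases d.get? t <;> simp [ht, hr, Option.or]

theorem get?_foldl_group (tbl : List (String × List String)) (d : PySem.Dict String String) (t : String) :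
    (tbl.foldl (fun d p => (p.1 :: p.2).foldl (fun d a => d.setdefault a p.1) d) d).get? t
      = (d.get? t).or (scanAliases? t tbl) := by
  induction tbl generalizing d with
  | nil => simp [scanAliases?]
  | cons p rest ih =>
      obtain ⟨k, as⟩ := p
      rw [List.foldl_cons, ih, get?_foldl_setdefault]
      by_cases h : t = k ∨ t ∈ as <;>
        cases d.get? t <;> simp [scanAliases?, h, Option.or, List.mem_cons]

theorem getD_reverseAliasMap (t : String) :
    reverseAliasMap.getD t t = scanAliases t forecastModeAliases := by
  rw [PySem.Dict.getD_eq_get?_getD, reverseAliasMap, get?_foldl_group, scanAliases_eq_getD]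
  simp [Option.or]

-- ===== VERDICT (by name: the statement is the Claim_ definition above) =====
theorem normalize_forecast_mode_py_spec : Claim_equal_normalize_forecast_mode_py := by
  intro mode _
  unfold Spec_normalize_forecast_mode_py normalize_forecast_mode_py normalize_forecast_mode_py_alt
  set token := PySem.Str.lower (PySem.Str.strip (mode.getD "")) with htok
  by_cases h0 : token = ""
  · simp [h0]
  · by_cases h1 : token = "auto"
    · simp [h1]
    · simp [h0, h1, getD_reverseAliasMap]
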